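-- pv_equiv track=rewrite | github.com/orcchg/HHSchool2016 | three.py | solve
-- ===== SOURCE A (Python) =====
-- def solve(n):
-- 	r = 1
-- 	for i in range(3, n + 1, 2):
-- 		s = i**2
-- 		b = i - 1
-- 		v = s * 4 - b * 6
-- 		r += v
-- 	return r
-- ===== SOURCE B (Python) =====
-- def solve(n):
-- 	# closed form: the loop adds 16k^2 + 36k + 24 for k = 0 .. m-1, m = number of odd i in [3, n]
-- 	m = (n - 1) // 2
-- 	if m < 0:
-- 		m = 0
-- 	return 1 + 8 * m * (m + 1) * (2 * m + 1) // 3 + 2 * m * (m + 1) + 4 * m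
-- ===== Notes on version B (the rewrite author's own statement) =====
-- stated objective: faster
-- what changed: Replaced the O(n) loop over odd i in [3, n] with a closed-form polynomial formula in m = (n-1)//2 (sums of k^2 and k), evaluated in O(1).
import Mathlib
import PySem

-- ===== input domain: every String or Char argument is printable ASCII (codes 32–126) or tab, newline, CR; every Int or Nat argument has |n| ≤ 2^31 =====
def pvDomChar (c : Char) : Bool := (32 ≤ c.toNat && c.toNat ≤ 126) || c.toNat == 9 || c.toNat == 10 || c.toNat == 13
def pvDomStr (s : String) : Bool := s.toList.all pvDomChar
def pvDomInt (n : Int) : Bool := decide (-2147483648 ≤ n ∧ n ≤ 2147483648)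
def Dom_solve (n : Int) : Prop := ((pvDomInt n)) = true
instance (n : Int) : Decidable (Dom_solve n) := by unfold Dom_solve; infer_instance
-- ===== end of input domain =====

-- B replaces A's loop over the odd integers in [3, n] with a closed-form polynomial formula (objective: faster).

-- ===== PORT A =====
def solve (n : Int) : Int :=
  (PySem.List.pyRange 3 (n + 1) 2).foldl
    (fun r i =>
      let s := i ^ 2
      let b := i - 1
      let v := s * 4 - b * 6
      r + v) 1

-- ===== PORT B =====
def solve_alt (n : Int) : Int :=
  let m0 := PySem.Int.floordiv (n - 1) 2
  let m := if m0 < 0 then 0 else m0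
  1 + PySem.Int.floordiv (8 * m * (m + 1) * (2 * m + 1)) 3 + 2 * m * (m + 1) + 4 * m

-- ===== PRECONDITION & SPEC =====
def Spec_solve (n : Int) (out : Int) : Prop := out = solve_alt n
instance (n : Int) (out : Int) : Decidable (Spec_solve n out) := by unfold Spec_solve; infer_instance

-- ===== CLAIM (what is proved, stated in full; the proofs are below) =====
def Claim_equal_solve : Prop := ∀ (n : Int), Dom_solve n → Spec_solve n (solve n)

-- ===== LEMMAS AND PROOFS =====

-- PySem floordiv with the positive literal divisors B uses is Int ediv
lemma floordiv_two_ediv (a : Int) : PySem.Int.floordiv a 2 = a / 2 := by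
  simp [PySem.Int.floordiv, Int.fdiv_eq_ediv]

lemma floordiv_three_ediv (a : Int) : PySem.Int.floordiv a 3 = a / 3 := by
  simp [PySem.Int.floordiv, Int.fdiv_eq_ediv]

-- the loop adds, for the k-th odd value i = 3 + 2k, the term i^2*4 - (i-1)*6; three times its
-- partial sum over k < M has this closed form (induction on M, pure polynomial identity)
lemma solve_sum3 (M : Nat) :
    3 * (((List.range M).map (fun k : Nat => (3 : Int) + 2 * k)).map
          (fun i => i ^ 2 * 4 - (i - 1) * 6)).sum
    = 8 * (M : Int) * ((M : Int) + 1) * (2 * (M : Int) + 1)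
      + 6 * (M : Int) * ((M : Int) + 1) + 12 * (M : Int) := by
  induction M with
  | zero => simp
  | succ M ih =>
    simp only [List.range_succ, List.map_append, List.sum_append, List.map_cons, List.map_nil,
      List.sum_cons, List.sum_nil, Nat.cast_add, Nat.cast_one]
    ring_nf
    ring_nf at ih
    linarith

theorem solve_spec : Claim_equal_solve := by
  intro n _
  unfold Spec_solve solve solve_alt
  rw [PySem.List.pyRange_of_pos 3 (n + 1) (by norm_num)]
  rw [PySem.List.foldl_add (g := fun i => i ^ 2 * 4 - (i - 1) * 6)]
  simp only [floordiv_two_ediv, floordiv_three_ediv]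
  by_cases h : (3 : Int) < n + 1
  · rw [if_pos h]
    have h2 : (n + 1 - 3 + 2 - 1) / 2 = (n - 1) / 2 := by omega
    rw [h2]
    set M : Nat := ((n - 1) / 2).toNat with hM
    have hMn : ((M : Int)) = (n - 1) / 2 := by
      rw [hM]; exact Int.toNat_of_nonneg (by omega)
    have hm0 : ¬ ((n - 1) / 2 < 0) := by omega
    rw [if_neg hm0, ← hMn]
    have hsum := solve_sum3 M
    set S : Int := (((List.range M).map (fun k : Nat => (3 : Int) + 2 * k)).map
        (fun i => i ^ 2 * 4 - (i - 1) * 6)).sum with hS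
    -- 8M(M+1)(2M+1) = 3 * (S - 2M(M+1) - 4M), so the floor division is exact
    have hdiv : 8 * (M : Int) * ((M : Int) + 1) * (2 * (M : Int) + 1)
        = 3 * (S - 2 * (M : Int) * ((M : Int) + 1) - 4 * (M : Int)) := by linarith
    rw [hdiv, Int.mul_ediv_cancel_left _ (by norm_num : (3:Int) ≠ 0)]
    ring
  · rw [if_neg h]
    have hz : (if (n - 1) / 2 < 0 then (0 : Int) else (n - 1) / 2) = 0 := by
      split_ifs with hw
      · rfl
      · omega
    rw [hz]
    norm_num
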